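-- pv_equiv track=rewrite | github.com/brawlingthebits/cederj-programming-fundamentals | AD2s/2018-1/katas dos tutores/AD2Q2.py | corrigir_mensagem
-- ===== SOURCE A (Python) =====
-- def repetido(pal, m):  # O uso de fatiamento (slicing) transforma essa função em uma linha de código.
--     for i in range(m):
--         if pal[len(pal) - 1 - m - i] != pal[len(pal) - 1 - i]:
--             return False
--     return True
--
-- def corrigirPalavra(pal):
--     for m in range(len(pal) // 2, 0, -1):  # m indica o tamanho da repetição a ser testada. Testar maiores primeiro.
--         if repetido(pal, m):
--             nova_pal = ""  # O uso de fatiamento (slicing) substitui o for a seguir por uma linha de código.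
--             for i in range(len(pal) - m):
--                 nova_pal += pal[i]
--             return nova_pal  # Se chegou até aqui é porque encontrou repetição.
--     return pal  # Se chegou até aqui é porque não encontrou repetição. Logo, a palavra não muda.
--
-- def corrigir_mensagem(msg):
--     qtd = 0
--     nova_msg = ""
--     for palavra in msg.split():
--         nova_palavra = corrigirPalavra(palavra)
--         if nova_palavra != palavra:
--             qtd += 1
--         nova_msg += nova_palavra + " "
--     return qtd, nova_msg.strip()  # Não houve desconto por presentation error na correção. Logo, o .strip() é opcional.
-- ===== SOURCE B (Python) =====
-- def corrigirPalavra(pal):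
--     # Z-function on the reversed word: best = largest m <= n//2 with z[m] >= m,
--     # i.e. the last m characters repeat the m before them; strip one copy.
--     n = len(pal)
--     r = pal[::-1]
--     z = [0] * n
--     l = rr = best = 0
--     for i in range(1, n):
--         zi = min(rr - i, z[i - l]) if i < rr else 0
--         while i + zi < n and r[zi] == r[i + zi]:
--             zi += 1
--         z[i] = zi
--         if i + zi > rr:
--             l, rr = i, i + zi
--         if 2 * i <= n and zi >= i:
--             best = i
--     return pal[:n - best]
--
-- def corrigir_mensagem(msg):
--     palavras = msg.split()
--     corrigidas = [corrigirPalavra(p) for p in palavras]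
--     qtd = sum(1 for p, c in zip(palavras, corrigidas) if c != p)
--     return qtd, ' '.join(corrigidas)
-- ===== Notes on version B (the rewrite author's own statement) =====
-- stated objective: alternative
-- what changed: Per word, B computes the Z-function of the reversed word with the classic two-pointer (l,r) window algorithm and takes the largest m <= len/2 with z[m] >= m as the duplicated-block size, instead of A's descending scan that re-compares up to m characters for every candidate m; the message is rebuilt with map/zip/join instead of string accumulators plus strip.
import Mathlib
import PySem

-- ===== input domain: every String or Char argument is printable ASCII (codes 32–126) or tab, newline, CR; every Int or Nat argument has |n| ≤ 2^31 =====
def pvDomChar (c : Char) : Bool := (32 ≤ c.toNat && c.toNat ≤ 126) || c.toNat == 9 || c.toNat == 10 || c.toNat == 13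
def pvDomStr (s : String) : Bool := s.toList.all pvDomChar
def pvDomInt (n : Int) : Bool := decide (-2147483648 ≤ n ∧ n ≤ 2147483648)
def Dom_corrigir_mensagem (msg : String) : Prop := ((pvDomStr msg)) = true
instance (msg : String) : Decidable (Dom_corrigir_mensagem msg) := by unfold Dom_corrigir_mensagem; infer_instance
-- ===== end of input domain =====

-- B fixes each word with a Z-function on the reversed word (largest m ≤ n/2 with z[m] ≥ m is the
-- duplicated block size) instead of A's descending scan of candidates; same return value.

-- ===== PORT A =====

-- 'for i in range(m): if pal[len-1-m-i] != pal[len-1-i]: return False' / 'return True'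
def repetido_go (pal : List Char) (m i : Nat) : Bool :=
  if _h : i < m then
    if PySem.List.pyGetD pal ((pal.length : Int) - 1 - (m : Int) - (i : Int)) ' '
        ≠ PySem.List.pyGetD pal ((pal.length : Int) - 1 - (i : Int)) ' ' then false
    else repetido_go pal m (i + 1)
  else true
termination_by m - i

def repetido (pal : List Char) (m : Nat) : Bool := repetido_go pal m 0

-- 'for m in range(len(pal)//2, 0, -1): if repetido(pal, m): <build nova_pal char by char>; return pal'
def corrigirPalavra_go (pal : List Char) : Nat → List Char
  | 0 => pal
  | Nat.succ k =>
    if repetido pal (k + 1) then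
      (List.range (pal.length - (k + 1))).foldl
        (fun acc (i : Nat) => acc ++ [PySem.List.pyGetD pal (i : Int) ' ']) []
    else corrigirPalavra_go pal k

def corrigirPalavra (pal : List Char) : List Char :=
  corrigirPalavra_go pal (pal.length / 2)

def corrigir_mensagem (msg : String) : Int × String :=
  let r := (PySem.Chars.split₀ msg.toList).foldl
    (fun acc palavra =>
      let nova := corrigirPalavra palavra
      (if nova ≠ palavra then acc.1 + 1 else acc.1, acc.2 ++ nova ++ [' ']))
    ((0 : Int), ([] : List Char))
  (r.1, String.ofList (PySem.Chars.strip r.2))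

-- ===== PORT B =====

-- 'while i + zi < n and r[zi] == r[i + zi]: zi += 1'  (indices are always in range, so getD is exact)
def zext (r : List Char) (i k : Nat) : Nat :=
  if h : i + k < r.length ∧ r.getD k ' ' = r.getD (i + k) ' ' then zext r i (k + 1) else k
termination_by r.length - (i + k)
decreasing_by omega

-- one iteration of B's for-loop; state = (z, l, rr, best).  Python keeps z as a zero-initialised
-- length-n list and writes z[i] = zi; here z grows by one per step — reads z[i-l] agree because
-- unwritten Python entries are 0 and getD returns 0 past the end.
def zstep (r : List Char) (st : List Nat × Nat × Nat × Nat) (i : Nat) : List Nat × Nat × Nat × Nat :=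
  let z0 := if i < st.2.2.1 then min (st.2.2.1 - i) (st.1.getD (i - st.2.1) 0) else 0
  let zi := zext r i z0
  let l' := if st.2.2.1 < i + zi then i else st.2.1
  let rr' := if st.2.2.1 < i + zi then i + zi else st.2.2.1
  let best' := if 2 * i ≤ r.length ∧ i ≤ zi then i else st.2.2.2
  (st.1 ++ [zi], l', rr', best')

def corrigirPalavra_alt (pal : List Char) : List Char :=
  let n := pal.length
  let r := pal.reverse
  let st := (List.range' 1 (n - 1)).foldl (zstep r) ([0], 0, 0, 0)
  pal.take (n - st.2.2.2)

def corrigir_mensagem_alt (msg : String) : Int × String :=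
  let palavras := PySem.Chars.split₀ msg.toList
  let corrigidas := palavras.map corrigirPalavra_alt
  let qtd : Int := ((palavras.zip corrigidas).countP (fun pc => pc.2 ≠ pc.1) : Nat)
  (qtd, String.ofList (PySem.Chars.join [' '] corrigidas))

-- ===== PRECONDITION & SPEC =====
def Spec_corrigir_mensagem (msg : String) (out : Int × String) : Prop := out = corrigir_mensagem_alt msg
instance (msg : String) (out : Int × String) : Decidable (Spec_corrigir_mensagem msg out) := by unfold Spec_corrigir_mensagem; infer_instance

-- ===== CLAIM (what is proved, stated in full; the proofs are below) =====
def Claim_equal_corrigir_mensagem : Prop := ∀ (msg : String), Dom_corrigir_mensagem msg → Spec_corrigir_mensagem msg (corrigir_mensagem msg)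

-- ===== LEMMAS AND PROOFS =====

-- the repeated-suffix property A's inner loop decides and B's z-condition detects
abbrev RepProp (pal : List Char) (m : Nat) : Prop :=
  (pal.drop (pal.length - 2 * m)).take m = pal.drop (pal.length - m)

-- best (largest) repetition size ≤ k, 0 if none — A's descending scan, characterised
def bestRep (pal : List Char) : Nat → Nat
  | 0 => 0
  | Nat.succ k => if repetido pal (k + 1) then k + 1 else bestRep pal k

-- longest common prefix length of two lists
def lcpLen : List Char → List Char → Nat
  | a :: as, b :: bs => if a = b then lcpLen as bs + 1 else 0
  | _, _ => 0

-- z-value spec: lcp of r and its suffix at i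
def lcp (r : List Char) (i : Nat) : Nat := lcpLen r (r.drop i)

-- largest m ≤ k with 2m ≤ |r| and z[m] ≥ m — what B's running 'best' holds
def bestZ (r : List Char) : Nat → Nat
  | 0 => 0
  | Nat.succ k => if 2 * (k + 1) ≤ r.length ∧ (k + 1) ≤ lcp r (k + 1) then k + 1 else bestZ r k

-- ---- A-side lemmas (repetido decides RepProp) ----

lemma repetido_go_eq (pal : List Char) (m : Nat) (hm : 2 * m ≤ pal.length) :
    ∀ i, repetido_go pal m i
      = decide (∀ j, i ≤ j → j < m →
          pal.getD (pal.length - 1 - m - j) ' ' = pal.getD (pal.length - 1 - j) ' ') := by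
  suffices H : ∀ k i, m - i ≤ k → repetido_go pal m i
      = decide (∀ j, i ≤ j → j < m →
          pal.getD (pal.length - 1 - m - j) ' ' = pal.getD (pal.length - 1 - j) ' ') from
    fun i => H (m - i) i le_rfl
  intro k
  induction k with
  | zero =>
    intro i hi
    rw [repetido_go]
    have hmi : ¬ i < m := by omega
    simp only [hmi, dite_false]
    symm
    simp only [decide_eq_true_eq]
    intro j h1 h2; omega
  | succ k ih =>
    intro i hi
    rw [repetido_go]
    by_cases him : i < m
    · have e1 : ((pal.length : Int) - 1 - (m : Int) - (i : Int)) = ((pal.length - 1 - m - i : Nat) : Int) := by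
        omega
      have e2 : ((pal.length : Int) - 1 - (i : Int)) = ((pal.length - 1 - i : Nat) : Int) := by
        omega
      simp only [him, dite_true, e1, e2, PySem.List.pyGetD_natCast]
      by_cases hc : pal.getD (pal.length - 1 - m - i) ' ' = pal.getD (pal.length - 1 - i) ' '
      · simp only [hc, ne_eq, not_true_eq_false, if_false]
        rw [ih (i + 1) (by omega)]
        simp only [decide_eq_decide]
        constructor
        · intro h j h1 h2
          rcases Nat.eq_or_lt_of_le h1 with h1' | h1'
          · exact h1' ▸ hc
          · exact h j h1' h2
        · intro h j h1 h2; exact h j (by omega) h2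
      · simp only [hc, ne_eq, not_false_eq_true, if_true]
        symm
        simp only [decide_eq_false_iff_not]
        intro h; exact hc (h i le_rfl him)
    · have : ¬ i < m := him
      simp only [this, dite_false]
      symm
      simp only [decide_eq_true_eq]
      intro j h1 h2; omega

lemma repetido_eq (pal : List Char) (m : Nat) (h1 : 1 ≤ m) (hm : 2 * m ≤ pal.length) :
    repetido pal m = decide (RepProp pal m) := by
  unfold repetido
  rw [repetido_go_eq pal m hm 0]
  simp only [decide_eq_decide]
  unfold RepProp
  constructor
  · intro h
    apply List.ext_getElem
    · simp; omega
    · intro i hi1 hi2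
      have him : i < m := by simp at hi1; omega
      have e := h (m - 1 - i) (Nat.zero_le _) (by omega)
      rw [List.getD_eq_getElem _ _ (by omega), List.getD_eq_getElem _ _ (by omega)] at e
      simp only [List.getElem_take, List.getElem_drop]
      convert e using 2 <;> omega
  · intro h j _ hj
    rw [List.getD_eq_getElem _ _ (by omega), List.getD_eq_getElem _ _ (by omega)]
    have hi : m - 1 - j < ((pal.drop (pal.length - 2 * m)).take m).length := by simp; omega
    have e := List.getElem_of_eq h hi
    simp only [List.getElem_take, List.getElem_drop] at e
    convert e using 2 <;> omega

lemma bestRep_le (pal : List Char) (k : Nat) : bestRep pal k ≤ k := by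
  induction k with
  | zero => simp [bestRep]
  | succ k ih => unfold bestRep; split <;> omega

lemma range_map_getD (pal : List Char) (k : Nat) (hk : k ≤ pal.length) :
    (List.range k).map (fun i => pal.getD i ' ') = pal.take k := by
  induction k with
  | zero => simp
  | succ k ih =>
    rw [List.range_succ, List.map_append, ih (by omega), List.take_add_one]
    simp [List.getElem?_eq_getElem (show k < pal.length by omega)]

lemma corrigirPalavra_go_eq (pal : List Char) (k : Nat) :
    corrigirPalavra_go pal k = pal.take (pal.length - bestRep pal k) := by
  induction k with
  | zero => simp [corrigirPalavra_go, bestRep]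
  | succ k ih =>
    unfold corrigirPalavra_go bestRep
    by_cases hr : repetido pal (k + 1)
    · simp only [hr, if_true]
      rw [PySem.List.foldl_append_singleton_eq_map (f := fun i : Nat => PySem.List.pyGetD pal (i : Int) ' ')]
      simp only [List.nil_append, PySem.List.pyGetD_natCast]
      exact range_map_getD pal (pal.length - (k + 1)) (by omega)
    · simp only [hr, Bool.false_eq_true, if_false]
      exact ih

-- ---- lcpLen basics ----

lemma lcpLen_le_left : ∀ (a b : List Char), lcpLen a b ≤ a.length := by
  intro a
  induction a with
  | nil => intro b; simp [lcpLen]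
  | cons x as ih =>
    intro b
    cases b with
    | nil => simp [lcpLen]
    | cons y bs =>
      unfold lcpLen
      split
      · have := ih bs; simp; omega
      · simp

lemma lcpLen_le_right : ∀ (a b : List Char), lcpLen a b ≤ b.length := by
  intro a
  induction a with
  | nil => intro b; simp [lcpLen]
  | cons x as ih =>
    intro b
    cases b with
    | nil => simp [lcpLen]
    | cons y bs =>
      unfold lcpLen
      split
      · have := ih bs; simp; omega
      · simp

lemma take_eq_of_le_lcpLen : ∀ (a b : List Char) (k : Nat), k ≤ lcpLen a b → a.take k = b.take k := by
  intro a
  induction a with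
  | nil =>
    intro b k hk
    simp [lcpLen] at hk
    simp [hk]
  | cons x as ih =>
    intro b k hk
    cases b with
    | nil => simp [lcpLen] at hk; simp [hk]
    | cons y bs =>
      unfold lcpLen at hk
      cases k with
      | zero => simp
      | succ k =>
        split at hk
        · rename_i hxy
          subst hxy
          simp only [List.take_succ_cons, List.cons.injEq, true_and]
          exact ih bs k (by omega)
        · omega

lemma le_lcpLen_of_take_eq : ∀ (a b : List Char) (k : Nat), a.take k = b.take k →
    k ≤ a.length → k ≤ b.length → k ≤ lcpLen a b := by
  intro a
  induction a with
  | nil => intro b k _ h _; simp at h; omega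
  | cons x as ih =>
    intro b k ht ha hb
    cases b with
    | nil => simp at hb; omega
    | cons y bs =>
      cases k with
      | zero => omega
      | succ k =>
        simp only [List.take_succ_cons, List.cons.injEq] at ht
        unfold lcpLen
        rw [if_pos ht.1]
        have := ih bs k ht.2 (by simpa using ha) (by simpa using hb)
        omega

lemma getD_eq_of_take_eq (a b : List Char) (m k : Nat) (h : a.take m = b.take m)
    (hk : k < m) (ha : k < a.length) (hb : k < b.length) : a.getD k ' ' = b.getD k ' ' := by
  rw [List.getD_eq_getElem _ _ ha, List.getD_eq_getElem _ _ hb]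
  have h1 : (a.take m)[k]'(by simp; omega) = a[k] := List.getElem_take
  have h2 : (b.take m)[k]'(by simp; omega) = b[k] := List.getElem_take
  rw [← h1, ← h2]
  exact List.getElem_of_eq h _

-- transfer of a segment equality through a matched window
lemma take_drop_of_take_eq (x y : List Char) (K d t : Nat) (h : x.take K = y.take K)
    (hdt : d + t ≤ K) : (x.drop d).take t = (y.drop d).take t := by
  have hx : (x.drop d).take t = (x.take (d + t)).drop d := by
    rw [List.drop_take]; congr 1; omega
  have hy : (y.drop d).take t = (y.take (d + t)).drop d := by
    rw [List.drop_take]; congr 1; omega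
  rw [hx, hy]
  have h2 : x.take (d + t) = y.take (d + t) := by
    have := congrArg (List.take (d + t)) h
    simpa [List.take_take, Nat.min_eq_left hdt] using this
  rw [h2]

-- ---- zext computes the lcp ----

lemma zext_eq (r : List Char) (i : Nat) :
    ∀ k, i + k ≤ r.length → r.take k = (r.drop i).take k → zext r i k = lcp r i := by
  suffices H : ∀ f k, r.length - (i + k) ≤ f → i + k ≤ r.length →
      r.take k = (r.drop i).take k → zext r i k = lcp r i from
    fun k h1 h2 => H (r.length - (i + k)) k le_rfl h1 h2
  intro f
  induction f with
  | zero =>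
    intro k hf hik ht
    have hik' : i + k = r.length := by omega
    rw [zext]
    have hc : ¬ (i + k < r.length ∧ r.getD k ' ' = r.getD (i + k) ' ') := by
      intro h; omega
    rw [dif_neg hc]
    have h1 : k ≤ lcp r i :=
      le_lcpLen_of_take_eq r (r.drop i) k ht (by omega) (by simp; omega)
    have h2 : lcp r i ≤ k := by
      have := lcpLen_le_right r (r.drop i)
      simp only [List.length_drop] at this
      unfold lcp; omega
    omega
  | succ f ih =>
    intro k hf hik ht
    rw [zext]
    by_cases hc : i + k < r.length ∧ r.getD k ' ' = r.getD (i + k) ' '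
    · rw [dif_pos hc]
      apply ih (k + 1) (by omega) (by omega)
      -- extend the matched prefix by one character
      have hkr : k < r.length := by omega
      have hkd : k < (r.drop i).length := by simp; omega
      rw [List.take_add_one, List.take_add_one, ht]
      congr 1
      rw [List.getElem?_eq_getElem hkr, List.getElem?_eq_getElem hkd]
      have e1 : r[k] = r.getD k ' ' := (List.getD_eq_getElem _ _ hkr).symm
      have e2 : (r.drop i)[k] = r.getD (i + k) ' ' := by
        rw [List.getElem_drop, ← List.getD_eq_getElem _ ' ' (by omega)]
      rw [e1, e2, hc.2]
    · rw [dif_neg hc]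
      have h1 : k ≤ lcp r i :=
        le_lcpLen_of_take_eq r (r.drop i) k ht (by omega) (by simp; omega)
      rcases Nat.lt_or_ge k r.length with hklen | hklen
      · -- either i+k = length or the characters differ
        by_cases hend : i + k < r.length
        · have hne : r.getD k ' ' ≠ r.getD (i + k) ' ' := fun he => hc ⟨hend, he⟩
          -- k < lcp would force the characters equal
          rcases Nat.lt_or_ge k (lcp r i) with hlt | hge
          · exfalso
            have htk := take_eq_of_le_lcpLen r (r.drop i) (k + 1) (by unfold lcp at hlt; omega)
            have := getD_eq_of_take_eq r (r.drop i) (k + 1) k htk (by omega) hklen (by simp; omega)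
            apply hne
            rw [this]
            simp [List.getD, List.getElem?_drop]
          · omega
        · have h2 : lcp r i ≤ k := by
            have := lcpLen_le_right r (r.drop i)
            simp only [List.length_drop] at this
            unfold lcp; omega
          omega
      · have h2 : lcp r i ≤ k := by
          have := lcpLen_le_left r (r.drop i)
          unfold lcp; omega
        omega

-- ---- the fold invariant ----

def ZInv (r : List Char) (j : Nat) (st : List Nat × Nat × Nat × Nat) : Prop :=
  st.1.length = j + 1 ∧
  st.1.getD 0 0 = 0 ∧
  (∀ m, 1 ≤ m → m ≤ j → st.1.getD m 0 = lcp r m) ∧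
  st.2.1 ≤ j ∧
  st.2.2.1 ≤ st.2.1 + lcp r st.2.1 ∧
  st.2.2.2 = bestZ r j

lemma lcp_le (r : List Char) (i : Nat) : lcp r i ≤ r.length - i := by
  have := lcpLen_le_right r (r.drop i)
  simp only [List.length_drop] at this
  unfold lcp; omega

lemma zstep_inv (r : List Char) (j : Nat) (st : List Nat × Nat × Nat × Nat)
    (h : ZInv r j st) (hj : j + 1 ≤ r.length) : ZInv r (j + 1) (zstep r st (j + 1)) := by
  obtain ⟨hlen, hz0, hzm, hl, hrr, hbest⟩ := h
  obtain ⟨z, l, rr, best⟩ := st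
  simp only at hlen hz0 hzm hl hrr hbest
  set i := j + 1 with hi
  -- the starting value z0 is a valid matched-prefix length
  have hvalid : ∀ z0', z0' = (if i < rr then min (rr - i) (z.getD (i - l) 0) else 0) →
      i + z0' ≤ r.length ∧ r.take z0' = (r.drop i).take z0' := by
    intro z0' hdef
    by_cases hir : i < rr
    · rw [if_pos hir] at hdef
      have hrrn : rr ≤ r.length := by
        have := lcp_le r l; omega
      by_cases hl1 : 1 ≤ l
      · have hil1 : 1 ≤ i - l := by omega
        have hilj : i - l ≤ j := by omega
        have hq : z.getD (i - l) 0 = lcp r (i - l) := hzm (i - l) hil1 hilj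
        rw [hq] at hdef
        constructor
        · omega
        · -- r.take z0' = (r.drop (i-l)).take z0' = (r.drop i).take z0'
          have s1 : r.take z0' = (r.drop (i - l)).take z0' :=
            take_eq_of_le_lcpLen r (r.drop (i - l)) z0' (by unfold lcp at hdef; omega)
          have s2 : r.take (rr - l) = (r.drop l).take (rr - l) :=
            take_eq_of_le_lcpLen r (r.drop l) (rr - l) (by unfold lcp at hrr; omega)
          have s3 : (r.drop (i - l)).take z0' = ((r.drop l).drop (i - l)).take z0' :=
            take_drop_of_take_eq r (r.drop l) (rr - l) (i - l) z0' s2 (by omega)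
          have s4 : (r.drop l).drop (i - l) = r.drop i := by
            rw [List.drop_drop]; congr 1; omega
          rw [s1, s3, s4]
      · -- l = 0: z.getD i 0 is past the end (z.length = j+1 = i), so z0' = 0
        have hl0 : l = 0 := by omega
        have : z.getD (i - l) 0 = 0 := by
          rw [hl0]
          simp only [Nat.sub_zero]
          rw [List.getD_eq_default]
          omega
        rw [this, Nat.min_zero] at hdef
        subst hdef
        exact ⟨by omega, by simp⟩
    · rw [if_neg hir] at hdef
      subst hdef
      simp
      omega
  unfold zstep
  simp only
  obtain ⟨hv1, hv2⟩ := hvalid _ rfl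
  have hzi : zext r i (if i < rr then min (rr - i) (z.getD (i - l) 0) else 0) = lcp r i :=
    zext_eq r i _ hv1 hv2
  rw [hzi]
  unfold ZInv
  dsimp only
  refine ⟨by simp [hlen], ?_, ?_, ?_, ?_, ?_⟩
  · rw [List.getD_append _ _ _ _ (by omega)]
    exact hz0
  · intro m hm1 hm2
    rcases Nat.lt_or_ge m (j + 1) with hmj | hmj
    · rw [List.getD_append _ _ _ _ (by omega)]
      exact hzm m hm1 (by omega)
    · have hmz : m = z.length := by omega
      subst hmz
      simp [List.getD, hlen]
  · split <;> omega
  · by_cases hcase : rr < i + lcp r i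
    · simp only [if_pos hcase]; omega
    · simp only [if_neg hcase]; omega
  · rw [hbest, hi]
    show (if 2 * (j + 1) ≤ r.length ∧ (j + 1) ≤ lcp r (j + 1) then (j + 1) else bestZ r j) = bestZ r (j + 1)
    conv_rhs => rw [bestZ]

lemma fold_inv (r : List Char) : ∀ j, j ≤ r.length - 1 →
    ZInv r j ((List.range' 1 j).foldl (zstep r) ([0], 0, 0, 0)) := by
  intro j
  induction j with
  | zero =>
    intro _
    refine ⟨rfl, rfl, ?_, le_rfl, ?_, rfl⟩
    · intro m hm1 hm2; omega
    · simp
  | succ j ih =>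
    intro hj
    rw [List.range'_concat]
    rw [List.foldl_append]
    simp only [List.foldl_cons, List.foldl_nil]
    have e : 1 + 1 * j = j + 1 := by omega
    rw [e]
    exact zstep_inv r j _ (ih (by omega)) (by omega)

-- ---- bestZ = bestRep ----

lemma lcp_ge_iff_rep (pal : List Char) (m : Nat) (h1 : 1 ≤ m) (hm : 2 * m ≤ pal.length) :
    m ≤ lcp pal.reverse m ↔ RepProp pal m := by
  set r := pal.reverse with hr
  set n := pal.length with hn
  have hrlen : r.length = n := by rw [hr, List.length_reverse, hn]
  have step1 : m ≤ lcp r m ↔ r.take m = (r.drop m).take m := by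
    constructor
    · intro h
      exact take_eq_of_le_lcpLen r (r.drop m) m h
    · intro h
      exact le_lcpLen_of_take_eq r (r.drop m) m h (by omega) (by simp [hrlen]; omega)
  rw [step1]
  have e1 : r.take m = (pal.drop (n - m)).reverse := by
    rw [hr, List.take_reverse]
  have e2 : (r.drop m).take m = ((pal.drop (n - 2 * m)).take m).reverse := by
    rw [hr, List.drop_reverse, List.take_reverse, List.drop_take]
    rw [List.reverse_inj]
    congr 1 <;> · simp; omega
  rw [e1, e2]
  unfold RepProp
  rw [List.reverse_inj]
  exact eq_comm

lemma bestZ_eq_bestRep (pal : List Char) : ∀ k, 2 * k ≤ pal.length →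
    bestZ pal.reverse k = bestRep pal k := by
  intro k
  induction k with
  | zero => intro _; rfl
  | succ k ih =>
    intro hk
    unfold bestZ bestRep
    rw [repetido_eq pal (k + 1) (by omega) (by omega)]
    have hc : (2 * (k + 1) ≤ pal.reverse.length ∧ (k + 1) ≤ lcp pal.reverse (k + 1)) ↔ RepProp pal (k + 1) := by
      rw [List.length_reverse]
      constructor
      · intro ⟨_, h2⟩
        exact (lcp_ge_iff_rep pal (k + 1) (by omega) (by omega)).mp h2
      · intro h
        exact ⟨by omega, (lcp_ge_iff_rep pal (k + 1) (by omega) (by omega)).mpr h⟩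
    by_cases hrep : RepProp pal (k + 1)
    · rw [if_pos (hc.mpr hrep), if_pos (by simpa using hrep)]
    · rw [if_neg (fun h => hrep (hc.mp h)), if_neg (by simpa using hrep), ih (by omega)]

lemma bestZ_high (r : List Char) : ∀ k, r.length / 2 ≤ k → bestZ r k = bestZ r (r.length / 2) := by
  intro k
  induction k with
  | zero => intro h; rw [show r.length / 2 = 0 from by omega]
  | succ k ih =>
    intro h
    rcases Nat.eq_or_lt_of_le h with he | hlt
    · rw [he]
    · conv_lhs => rw [bestZ]
      rw [if_neg (by intro hcon; omega)]
      exact ih (by omega)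

lemma corrigirPalavra_eq (pal : List Char) :
    corrigirPalavra pal = corrigirPalavra_alt pal := by
  unfold corrigirPalavra corrigirPalavra_alt
  dsimp only
  rw [corrigirPalavra_go_eq pal (pal.length / 2)]
  have hinv := fold_inv pal.reverse (pal.length - 1) (by simp)
  have hbest := hinv.2.2.2.2.2
  rw [hbest]
  have hlen : pal.reverse.length = pal.length := by simp
  have hhigh := bestZ_high pal.reverse (pal.length - 1) (by rw [hlen]; omega)
  rw [hhigh, show pal.reverse.length / 2 = pal.length / 2 by rw [hlen],
    bestZ_eq_bestRep pal (pal.length / 2) (by omega)]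

-- ---- message-level lemmas ----

lemma split₀_go_inv (s : List Char) :
    ∀ (cur acc : _), (∀ c ∈ cur, PySem.Chars.isspace c = false) →
      (∀ w ∈ acc, w ≠ [] ∧ ∀ c ∈ w, PySem.Chars.isspace c = false) →
      ∀ w ∈ PySem.Chars.split₀.go s cur acc, w ≠ [] ∧ ∀ c ∈ w, PySem.Chars.isspace c = false := by
  induction s with
  | nil =>
    intro cur acc hcur hacc w hw
    rw [PySem.Chars.split₀.go] at hw
    by_cases hc : cur.isEmpty
    · rw [if_pos hc] at hw
      exact hacc w (List.mem_reverse.mp hw)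
    · rw [if_neg hc] at hw
      rcases List.mem_cons.mp (List.mem_reverse.mp hw) with h | h
      · subst h
        refine ⟨by simpa [List.isEmpty_iff] using hc, ?_⟩
        intro c hcmem
        exact hcur c (List.mem_reverse.mp hcmem)
      · exact hacc w h
  | cons c rest ih =>
    intro cur acc hcur hacc w hw
    rw [PySem.Chars.split₀.go] at hw
    by_cases hsp : PySem.Chars.isspace c
    · rw [if_pos hsp] at hw
      by_cases hc : cur.isEmpty
      · rw [if_pos hc] at hw
        exact ih [] acc (by simp) hacc w hw
      · rw [if_neg hc] at hw
        refine ih [] (cur.reverse :: acc) (by simp) ?_ w hw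
        intro v hv
        rcases List.mem_cons.mp hv with h | h
        · subst h
          refine ⟨by simpa [List.isEmpty_iff] using hc, ?_⟩
          intro d hd
          exact hcur d (List.mem_reverse.mp hd)
        · exact hacc v h
    · rw [if_neg hsp] at hw
      refine ih (c :: cur) acc ?_ hacc w hw
      intro d hd
      rcases List.mem_cons.mp hd with h | h
      · subst h
        simpa using hsp
      · exact hcur d h

lemma split₀_words (s : List Char) :
    ∀ w ∈ PySem.Chars.split₀ s, w ≠ [] ∧ ∀ c ∈ w, PySem.Chars.isspace c = false := by
  unfold PySem.Chars.split₀
  exact split₀_go_inv s [] [] (by simp) (by simp)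

lemma corrigirPalavra_alt_pres (w : List Char) (hw : w ≠ []) (hs : ∀ c ∈ w, PySem.Chars.isspace c = false) :
    corrigirPalavra_alt w ≠ [] ∧ ∀ c ∈ corrigirPalavra_alt w, PySem.Chars.isspace c = false := by
  rw [← corrigirPalavra_eq]
  unfold corrigirPalavra
  rw [corrigirPalavra_go_eq]
  have hb := bestRep_le w (w.length / 2)
  have hlen : 0 < w.length := List.length_pos_of_ne_nil hw
  constructor
  · have : (w.take (w.length - bestRep w (w.length / 2))).length = w.length - bestRep w (w.length / 2) := by
      simp
    intro hnil
    rw [hnil] at this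
    simp at this
    omega
  · intro c hc
    exact hs c (List.mem_of_mem_take hc)

lemma flatMap_space (vs : List (List Char)) (h : vs ≠ []) :
    vs.flatMap (fun v => v ++ [' ']) = PySem.Chars.join [' '] vs ++ [' '] := by
  induction vs with
  | nil => exact absurd rfl h
  | cons v vs ih =>
    cases vs with
    | nil => simp [PySem.Chars.join_singleton]
    | cons w t =>
      rw [List.flatMap_cons, ih (by simp), PySem.Chars.join_cons_cons]
      simp [List.append_assoc]

lemma join_last_ns : ∀ (vs : List (List Char)), vs ≠ [] →
    (∀ v ∈ vs, v ≠ [] ∧ ∀ c ∈ v, PySem.Chars.isspace c = false) →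
    ∃ d t, (PySem.Chars.join [' '] vs).reverse = d :: t ∧ PySem.Chars.isspace d = false := by
  intro vs
  induction vs with
  | nil => exact fun h _ => absurd rfl h
  | cons v vs ih =>
    intro h hv
    cases vs with
    | nil =>
      rw [PySem.Chars.join_singleton]
      obtain ⟨hv, hvs⟩ := hv v (by simp)
      obtain ⟨d, t, ht⟩ := List.exists_cons_of_ne_nil (show v.reverse ≠ [] by simpa using hv)
      exact ⟨d, t, ht, hvs d (List.mem_reverse.mp (ht ▸ List.mem_cons_self ..))⟩
    | cons w t =>
      rw [PySem.Chars.join_cons_cons]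
      obtain ⟨d, tt, hdt, hd⟩ := ih (by simp) (fun u hu => hv u (List.mem_cons_of_mem _ hu))
      refine ⟨d, tt ++ (' ' :: v.reverse), ?_, hd⟩
      simp [List.reverse_append, hdt]

lemma strip_flat (vs : List (List Char))
    (hall : ∀ v ∈ vs, v ≠ [] ∧ ∀ c ∈ v, PySem.Chars.isspace c = false) :
    PySem.Chars.strip (vs.flatMap (fun v => v ++ [' '])) = PySem.Chars.join [' '] vs := by
  cases hvs : vs with
  | nil => simp [PySem.Chars.strip, PySem.Chars.lstrip, PySem.Chars.rstrip, PySem.Chars.join_nil]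
  | cons v t =>
    rw [← hvs, flatMap_space vs (by simp [hvs])]
    obtain ⟨hvne, hvsp⟩ := hall v (by simp [hvs])
    obtain ⟨c, v', hv'⟩ := List.exists_cons_of_ne_nil hvne
    have hc : PySem.Chars.isspace c = false := hvsp c (by simp [hv'])
    have hrest : ∃ rest, PySem.Chars.join [' '] vs = c :: rest := by
      subst hvs
      cases t with
      | nil => exact ⟨v', by rw [PySem.Chars.join_singleton, hv']⟩
      | cons w t' =>
        rw [PySem.Chars.join_cons_cons, hv']
        exact ⟨v' ++ ([' '] ++ PySem.Chars.join [' '] (w :: t')), by simp⟩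
    obtain ⟨rest, hrest⟩ := hrest
    obtain ⟨d, tt, hdt, hd⟩ := join_last_ns vs (by simp [hvs]) hall
    have hl : List.dropWhile PySem.Chars.isspace (PySem.Chars.join [' '] vs ++ [' '])
        = PySem.Chars.join [' '] vs ++ [' '] := by
      rw [hrest]
      exact List.dropWhile_cons_of_neg (by simp [hc])
    have hr2 : List.dropWhile PySem.Chars.isspace (PySem.Chars.join [' '] vs ++ [' ']).reverse
        = (PySem.Chars.join [' '] vs).reverse := by
      have hrev : (PySem.Chars.join [' '] vs ++ [' ']).reverse
          = ' ' :: (PySem.Chars.join [' '] vs).reverse := by simp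
      rw [hrev, List.dropWhile_cons_of_pos (by rfl), hdt,
        List.dropWhile_cons_of_neg (by simp [hd]), ← hdt]
    unfold PySem.Chars.strip PySem.Chars.lstrip PySem.Chars.rstrip
    rw [hl, hr2, List.reverse_reverse]

-- ===== VERDICT (by name: the statement is the Claim_ definition above) =====
theorem corrigir_mensagem_spec : Claim_equal_corrigir_mensagem := by
  intro msg _
  unfold Spec_corrigir_mensagem corrigir_mensagem corrigir_mensagem_alt
  dsimp only
  have hfun : corrigirPalavra = corrigirPalavra_alt := funext corrigirPalavra_eq
  rw [hfun]
  rw [PySem.List.foldl_prod_mk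
    (f := fun q w => if corrigirPalavra_alt w ≠ w then q + 1 else q)
    (g := fun s w => s ++ corrigirPalavra_alt w ++ [' '])]
  set words := PySem.Chars.split₀ msg.toList with hwords
  simp only [Prod.mk.injEq]
  constructor
  · -- counts agree
    rw [PySem.List.foldl_ite_add_one (p := fun w => corrigirPalavra_alt w ≠ w)]
    have hz : words.zip (words.map corrigirPalavra_alt)
        = words.map (fun w => (w, corrigirPalavra_alt w)) := by
      rw [← List.zip_map' (f := fun w => w) (g := corrigirPalavra_alt) (l := words)]
      simp
    rw [hz, List.countP_map]
    simp [Function.comp_def]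
  · -- messages agree
    have : List.foldl (fun s w => s ++ corrigirPalavra_alt w ++ [' ']) [] words
        = words.flatMap (fun w => corrigirPalavra_alt w ++ [' ']) := by
      have := PySem.List.foldl_append_eq_flatMap (g := fun w => corrigirPalavra_alt w ++ [' ']) words []
      simpa [List.append_assoc] using this
    rw [this]
    have hmapflat : words.flatMap (fun w => corrigirPalavra_alt w ++ [' '])
        = (words.map corrigirPalavra_alt).flatMap (fun v => v ++ [' ']) := by
      rw [List.flatMap_map]
    rw [hmapflat, strip_flat]
    intro v hvmem
    obtain ⟨w, hw, rfl⟩ := List.mem_map.mp hvmem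
    obtain ⟨h1, h2⟩ := split₀_words msg.toList w hw
    exact corrigirPalavra_alt_pres w h1 h2
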